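-- pv_equiv track=rewrite | github.com/callmedada/LIMBO | src/limbo_cluster/utils.py | encode_records
-- ===== SOURCE A (Python) =====
-- from typing import Dict, List
--
-- def encode_records(records: List[Dict[str, str]]):
--     """Return (encoded_records, attr2id, id2attr)."""
--     attr2id: Dict[str, int] = {}
--     encoded = []
--     for rec in records:
--         out = {}
--         for k, v in rec.items():
--             key = f"{k}.{v}"
--             idx = attr2id.setdefault(key, len(attr2id))
--             out[idx] = 1  # presence flag (binary). prob later.
--         encoded.append(out)
--     id2attr = {i: s for s, i in attr2id.items()}
--     return encoded, attr2id, id2attr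
-- ===== SOURCE B (Python) =====
-- def encode_records(records):
--     """Return (encoded_records, attr2id, id2attr).
--
--     Two passes: first build the complete attr2id table (first-seen order),
--     then encode each record by lookup only.
--     """
--     attr2id = {}
--     for rec in records:
--         for k, v in rec.items():
--             attr2id.setdefault(f"{k}.{v}", len(attr2id))
--     encoded = [{attr2id[f"{k}.{v}"]: 1 for k, v in rec.items()} for rec in records]
--     id2attr = {i: s for s, i in attr2id.items()}
--     return encoded, attr2id, id2attr
-- ===== Notes on version B (the rewrite author's own statement) =====
-- stated objective: alternative
-- what changed: Replaces A's single interleaved loop, which grows attr2id while simultaneously encoding each record against the partially built table, by two separate passes: one that only builds the full attr2id table, and a lookup-only comprehension pass that encodes every record against the finished table (correct because setdefault never changes an existing id).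
import Mathlib
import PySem

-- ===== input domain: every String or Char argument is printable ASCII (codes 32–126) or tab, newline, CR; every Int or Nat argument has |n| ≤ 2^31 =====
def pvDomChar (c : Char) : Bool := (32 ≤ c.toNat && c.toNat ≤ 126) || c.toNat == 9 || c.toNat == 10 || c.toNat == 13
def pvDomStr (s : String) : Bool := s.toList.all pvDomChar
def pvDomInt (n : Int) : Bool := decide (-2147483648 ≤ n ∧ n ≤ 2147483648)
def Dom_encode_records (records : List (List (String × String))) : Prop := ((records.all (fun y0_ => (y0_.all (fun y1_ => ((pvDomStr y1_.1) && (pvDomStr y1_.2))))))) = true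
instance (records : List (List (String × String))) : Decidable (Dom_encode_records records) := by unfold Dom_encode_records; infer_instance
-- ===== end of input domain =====

-- B replaces A's single interleaved loop by an index-building pass followed by a
-- lookup-only encoding pass (alternative decomposition, same asymptotic cost).

-- ===== PORT A =====
-- A: one loop; attr2id grows via setdefault while each record is encoded against it.
def encode_records (records : List (List (String × String))) : (List (List (Int × Int))) × (List (String × Int)) × (List (Int × String)) :=
  let st := records.foldl
    (fun (st : PySem.Dict String Int × List (PySem.Dict Int Int)) rec =>
      let inner := rec.foldl
        (fun (q : PySem.Dict String Int × PySem.Dict Int Int) kv =>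
          let key := kv.1 ++ "." ++ kv.2
          let a2i := q.1.setdefault key (q.1.size : Int)   -- idx := setdefault's return value
          let idx := a2i.getD key 0
          (a2i, q.2.insert idx 1))
        (st.1, PySem.Dict.empty)
      (inner.1, st.2 ++ [inner.2]))
    (PySem.Dict.empty, [])
  let attr2id := st.1
  let id2attr := attr2id.items.foldl
    (fun (d : PySem.Dict Int String) p => d.insert p.2 p.1) PySem.Dict.empty
  (st.2.map (·.items), attr2id.items, id2attr.items)

-- ===== PORT B =====
-- B: pass 1 builds the full attr2id table; pass 2 encodes by lookup only.
def encode_records_alt (records : List (List (String × String))) : (List (List (Int × Int))) × (List (String × Int)) × (List (Int × String)) :=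
  let attr2id := records.foldl
    (fun (a2i : PySem.Dict String Int) rec =>
      rec.foldl (fun a2i kv => a2i.setdefault (kv.1 ++ "." ++ kv.2) (a2i.size : Int)) a2i)
    PySem.Dict.empty
  let encoded := records.map (fun rec =>
    (rec.foldl
      (fun (d : PySem.Dict Int Int) kv => d.insert (attr2id.getD (kv.1 ++ "." ++ kv.2) 0) 1)
      PySem.Dict.empty).items)
  let id2attr := attr2id.items.foldl
    (fun (d : PySem.Dict Int String) p => d.insert p.2 p.1) PySem.Dict.empty
  (encoded, attr2id.items, id2attr.items)

-- ===== PRECONDITION & SPEC =====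
def Spec_encode_records (records : List (List (String × String))) (out : (List (List (Int × Int))) × (List (String × Int)) × (List (Int × String))) : Prop := out = encode_records_alt records
instance (records : List (List (String × String))) (out : (List (List (Int × Int))) × (List (String × Int)) × (List (Int × String))) : Decidable (Spec_encode_records records out) := by unfold Spec_encode_records; infer_instance

-- ===== CLAIM (what is proved, stated in full; the proofs are below) =====
def Claim_equal_encode_records : Prop := ∀ (records : List (List (String × String))), Dom_encode_records records → Spec_encode_records records (encode_records records)

-- ===== LEMMAS AND PROOFS =====

-- the table-building step shared (provably) by both ports
def pvF1 (d : PySem.Dict String Int) (kv : String × String) : PySem.Dict String Int :=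
  d.setdefault (kv.1 ++ "." ++ kv.2) (d.size : Int)

-- "d' extends d": every binding of d survives (setdefault never overwrites)
def pvExt (d d' : PySem.Dict String Int) : Prop :=
  ∀ k v, d.get? k = some v → d'.get? k = some v

theorem pvExt_refl (d : PySem.Dict String Int) : pvExt d d := fun _ _ h => h

theorem pvExt_setdefault (d : PySem.Dict String Int) (k : String) (v : Int) :
    pvExt d (d.setdefault k v) := by
  intro k' v' h
  by_cases hk : k' = k
  · subst hk
    rw [PySem.Dict.get?_setdefault_self, h]
    rfl
  · rw [PySem.Dict.get?_setdefault_of_ne _ _ hk]; exact h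

theorem pvExt_foldl (l : List (String × String)) (d : PySem.Dict String Int) :
    pvExt d (l.foldl pvF1 d) := by
  induction l generalizing d with
  | nil => exact pvExt_refl d
  | cons kv rest ih =>
    intro k v h
    exact ih (pvF1 d kv) k v (pvExt_setdefault d _ _ k v h)

theorem pvExt_foldl_outer (rs : List (List (String × String))) (d : PySem.Dict String Int) :
    pvExt d (rs.foldl (fun a2i rec => rec.foldl pvF1 a2i) d) := by
  induction rs generalizing d with
  | nil => exact pvExt_refl d
  | cons rec rest ih =>
    intro k v h
    exact ih _ k v (pvExt_foldl rec d k v h)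

-- A's inner loop, named
def pvInner (d : PySem.Dict String Int) (o : PySem.Dict Int Int) (rec : List (String × String)) :
    PySem.Dict String Int × PySem.Dict Int Int :=
  rec.foldl
    (fun (q : PySem.Dict String Int × PySem.Dict Int Int) kv =>
      let key := kv.1 ++ "." ++ kv.2
      let a2i := q.1.setdefault key (q.1.size : Int)
      let idx := a2i.getD key 0
      (a2i, q.2.insert idx 1))
    (d, o)

-- A's inner loop: table component is the pvF1 fold, and against any table D extending
-- the fold's result the encoding equals the lookup-only encoding in D
theorem pvInner_spec (rec : List (String × String)) (d : PySem.Dict String Int)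
    (o : PySem.Dict Int Int) (D : PySem.Dict String Int)
    (hD : pvExt (rec.foldl pvF1 d) D) :
    pvInner d o rec =
      (rec.foldl pvF1 d,
       rec.foldl (fun (x : PySem.Dict Int Int) kv => x.insert (D.getD (kv.1 ++ "." ++ kv.2) 0) 1) o) := by
  induction rec generalizing d o with
  | nil => rfl
  | cons kv rest ih =>
    have hstep : pvExt (pvF1 d kv) D := by
      intro k v h
      exact hD k v (pvExt_foldl rest (pvF1 d kv) k v h)
    have hkey : (pvF1 d kv).get? (kv.1 ++ "." ++ kv.2) =
        some ((d.get? (kv.1 ++ "." ++ kv.2)).getD (d.size : Int)) := by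
      simp [pvF1, PySem.Dict.get?_setdefault_self]
    have hidx : (pvF1 d kv).getD (kv.1 ++ "." ++ kv.2) 0 = D.getD (kv.1 ++ "." ++ kv.2) 0 := by
      rw [PySem.Dict.getD_of_get?_eq_some _ _ hkey,
          PySem.Dict.getD_of_get?_eq_some _ _ (hstep _ _ hkey)]
    simp only [pvF1] at hidx
    show pvInner (pvF1 d kv) _ rest = _
    rw [ih (pvF1 d kv) _ hD]
    simp only [List.foldl_cons, pvF1, hidx]

-- A's outer loop against the final table D
theorem pvOuter_spec (rs : List (List (String × String))) (d : PySem.Dict String Int)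
    (acc : List (PySem.Dict Int Int)) (D : PySem.Dict String Int)
    (hD : pvExt (rs.foldl (fun a2i rec => rec.foldl pvF1 a2i) d) D) :
    rs.foldl
      (fun (st : PySem.Dict String Int × List (PySem.Dict Int Int)) rec =>
        let inner := pvInner st.1 PySem.Dict.empty rec
        (inner.1, st.2 ++ [inner.2]))
      (d, acc) =
    (rs.foldl (fun a2i rec => rec.foldl pvF1 a2i) d,
     acc ++ rs.map (fun rec =>
       rec.foldl (fun (x : PySem.Dict Int Int) kv => x.insert (D.getD (kv.1 ++ "." ++ kv.2) 0) 1)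
         PySem.Dict.empty)) := by
  induction rs generalizing d acc with
  | nil => simp
  | cons rec rest ih =>
    have hrec : pvExt (rec.foldl pvF1 d) D := by
      intro k v h
      exact hD k v (pvExt_foldl_outer rest _ k v h)
    simp only [List.foldl_cons, List.map_cons]
    rw [pvInner_spec rec d PySem.Dict.empty D hrec]
    rw [ih (rec.foldl pvF1 d) _ hD]
    simp

-- ===== VERDICT (by name: the statement is the Claim_ definition above) =====
theorem encode_records_spec : Claim_equal_encode_records := by
  intro records _
  unfold Spec_encode_records
  have h := pvOuter_spec records PySem.Dict.empty []
      (records.foldl (fun a2i rec => rec.foldl pvF1 a2i) PySem.Dict.empty)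
      (pvExt_refl _)
  simp only [pvInner, List.nil_append] at h
  simp only [encode_records, encode_records_alt]
  rw [h]
  have hf : pvF1 = fun (a2i : PySem.Dict String Int) kv =>
      a2i.setdefault (kv.1 ++ "." ++ kv.2) (a2i.size : Int) := rfl
  rw [hf]
  simp [List.map_map]
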